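-- pv_equiv track=rewrite | github.com/mateozorzi/TDA | RPL_2025/3.PrgDinamica/ej15_soga.py | buscarOptimos
-- ===== SOURCE A (Python) =====
-- def buscarOptimos(n):
--     optimos = [0] * (n+1)
--     optimos[0] = 0
--     optimos[1] = 1
--
--     for i in range(2,len(optimos)):
--         for j in range(1,i):
--             optimos[i] = max(optimos[i], j * max(optimos[i-j], i-j))
--
--     return optimos
-- ===== SOURCE B (Python) =====
-- def buscarOptimos(n):
--     # Closed form: optimal rope-cut products are powers of 3 with remainder handling.
--     def opt(i):
--         if i < 4:
--             return (0, 1, 1, 2)[i]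
--         q, r = divmod(i, 3)
--         if r == 0:
--             return 3 ** q
--         if r == 1:
--             return 4 * 3 ** (q - 1)
--         return 2 * 3 ** q
--     return [opt(i) for i in range(n + 1)]
-- ===== Notes on version B (the rewrite author's own statement) =====
-- stated objective: faster
-- what changed: Replaces the O(n^2) double-loop DP over all split points by the closed-form rope-cutting formula (break into 3s, remainder 1 -> 4*3^(q-1), remainder 2 -> 2*3^q), computing each entry directly.
import Mathlib
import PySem

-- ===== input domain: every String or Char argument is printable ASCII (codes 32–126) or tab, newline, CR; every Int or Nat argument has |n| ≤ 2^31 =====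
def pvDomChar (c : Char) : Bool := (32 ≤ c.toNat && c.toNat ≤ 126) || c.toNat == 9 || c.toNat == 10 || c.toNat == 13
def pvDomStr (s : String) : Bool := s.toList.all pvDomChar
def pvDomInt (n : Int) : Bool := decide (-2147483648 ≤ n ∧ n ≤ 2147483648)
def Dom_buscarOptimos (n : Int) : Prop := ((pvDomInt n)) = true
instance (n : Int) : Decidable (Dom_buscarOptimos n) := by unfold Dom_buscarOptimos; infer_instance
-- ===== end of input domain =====

-- B replaces A's O(n^2) double-loop DP by the closed-form cut-into-3s formula (measured asymptotically faster).


-- ===== PORT A =====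
-- literal port of A: optimos = [0]*(n+1); optimos[0]=0; optimos[1]=1; double loop maximising
-- optimos[i] = max(optimos[i], j*max(optimos[i-j], i-j)). Indexing/assignment via pyGetD/pySetD,
-- total forms exact under Pre_ (1 ≤ n), where every index is in range.
def buscarOptimos (n : Int) : List Int :=
  let optimos := List.replicate (n + 1).toNat (0 : Int)
  let optimos := optimos.set 0 0
  let optimos := optimos.set 1 1
  (PySem.List.pyRange 2 (PySem.List.len optimos) 1).foldl
    (fun opt i =>
      (PySem.List.pyRange 1 i 1).foldl
        (fun o j =>
          PySem.List.pySetD o i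
            (max (PySem.List.pyGetD o i 0) (j * max (PySem.List.pyGetD o (i - j) 0) (i - j))))
        opt)
    optimos

-- ===== PORT B =====
-- literal port of Source B: opt(i) is a table lookup for i < 4, else divmod(i, 3) and the power-of-3 formula.
def pvOpt (i : Int) : Int :=
  if i < 4 then PySem.List.pyGetD [0, 1, 1, 2] i 0
  else
    let q := PySem.Int.floordiv i 3
    let r := PySem.Int.mod i 3
    if r = 0 then 3 ^ q.toNat
    else if r = 1 then 4 * 3 ^ (q - 1).toNat
    else 2 * 3 ^ q.toNat

def buscarOptimos_alt (n : Int) : List Int :=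
  (PySem.List.pyRange 0 (n + 1) 1).map pvOpt

-- ===== PRECONDITION & SPEC =====
-- A raises IndexError for every n ≤ 0 (writing optimos[1] into a list of length ≤ 1); Pre_ keeps exactly n ≥ 1.
def Pre_buscarOptimos (n : Int) : Prop := 1 ≤ n
instance (n : Int) : Decidable (Pre_buscarOptimos n) := by unfold Pre_buscarOptimos; infer_instance
def pvWitness_buscarOptimos : Int := (5)

def Spec_buscarOptimos (n : Int) (out : List Int) : Prop := out = buscarOptimos_alt n
instance (n : Int) (out : List Int) : Decidable (Spec_buscarOptimos n out) := by unfold Spec_buscarOptimos; infer_instance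

-- ===== CLAIM (what is proved, stated in full; the proofs are below) =====
def Claim_equal_buscarOptimos : Prop := ∀ (n : Int), Dom_buscarOptimos n → Pre_buscarOptimos n → Spec_buscarOptimos n (buscarOptimos n)

-- ===== LEMMAS AND PROOFS =====

def pvOptN (i : Nat) : Int :=
  if i < 4 then ([0, 1, 1, 2] : List Int).getD i 0
  else if i % 3 = 0 then 3 ^ (i / 3)
  else if i % 3 = 1 then 4 * 3 ^ (i / 3 - 1)
  else 2 * 3 ^ (i / 3)
def pvG (a : Nat) : Int := max (pvOptN a) (a : Int)

lemma pvOpt_natCast (i : Nat) : pvOpt (i : Int) = pvOptN i := by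
  unfold pvOpt pvOptN
  by_cases h : i < 4
  · interval_cases i <;> decide
  · have h4 : ¬ ((i : Int) < 4) := by exact_mod_cast h
    have hfd : PySem.Int.floordiv (i : Int) 3 = ((i / 3 : Nat) : Int) := by
      rw [PySem.Int.floordiv_eq_ediv_of_pos (by norm_num)]; omega
    have hmd : PySem.Int.mod (i : Int) 3 = ((i % 3 : Nat) : Int) := by
      rw [PySem.Int.mod_eq_emod_of_pos (by norm_num)]; omega
    simp only [h, h4, if_neg, hfd, hmd]
    have hq : ((i / 3 : Nat) : Int).toNat = i / 3 := by omega
    have hq1 : (((i / 3 : Nat) : Int) - 1).toNat = i / 3 - 1 := by omega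
    rw [hq, hq1]
    norm_cast

lemma pvOptN_add3 (a : Nat) (h : 4 ≤ a) : pvOptN (a + 3) = 3 * pvOptN a := by
  unfold pvOptN
  have h1 : ¬ (a + 3 < 4) := by omega
  have h2 : ¬ (a < 4) := by omega
  have h3 : (a + 3) % 3 = a % 3 := by omega
  have h4 : (a + 3) / 3 = a / 3 + 1 := by omega
  simp only [h1, h2, if_neg, h3, h4]
  rcases (by omega : a % 3 = 0 ∨ a % 3 = 1 ∨ a % 3 = 2) with h0 | h1 | h2
  · simp [h0, pow_succ]; ring
  · have : a / 3 ≥ 1 := by omega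
    simp [h1]
    obtain ⟨q, hq⟩ : ∃ q, a / 3 = q + 1 := ⟨a / 3 - 1, by omega⟩
    rw [hq]
    simp [pow_succ]
    ring
  · simp [h2, pow_succ]; ring

lemma pvOptN_ge (a : Nat) (h : 4 ≤ a) : (a : Int) ≤ pvOptN a := by
  induction a using Nat.strong_induction_on with
  | _ a ih =>
    by_cases h7 : a < 7
    · interval_cases a <;> decide
    · have ha : a = (a - 3) + 3 := by omega
      rw [ha, pvOptN_add3 _ (by omega)]
      have := ih (a - 3) (by omega) (by omega)
      push_cast
      omega

lemma pvG_eq_opt (a : Nat) (h : 4 ≤ a) : pvG a = pvOptN a := by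
  simp [pvG, pvOptN_ge a h]

lemma pvG_add3 (a : Nat) (h : 2 ≤ a) : pvG (a + 3) = 3 * pvG a := by
  by_cases h4 : a < 4
  · interval_cases a <;> decide
  · rw [pvG_eq_opt _ (by omega), pvG_eq_opt _ (by omega), pvOptN_add3 _ (by omega)]

lemma pvG_nonneg (a : Nat) : 0 ≤ pvG a := le_trans (by positivity) (le_max_right _ _)

lemma pvG_supermul_aux : ∀ s a b : Nat, a + b = s → 1 ≤ a → 1 ≤ b → pvG a * pvG b ≤ pvG (a + b) := by
  intro s
  induction s using Nat.strong_induction_on with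
  | _ s ih =>
  intro a b hs ha hb
  rcases Nat.lt_or_ge a 5 with ha5 | ha5
  · rcases Nat.lt_or_ge b 5 with hb5 | hb5
    · interval_cases a <;> interval_cases b <;> decide
    · obtain ⟨c, rfl⟩ : ∃ c, b = c + 3 := ⟨b - 3, by omega⟩
      have h1 : pvG (c + 3) = 3 * pvG c := pvG_add3 c (by omega)
      have h2 : pvG (a + c + 3) = 3 * pvG (a + c) := pvG_add3 _ (by omega)
      have h3 := ih (a + c) (by omega) a c rfl (by omega) (by omega)
      rw [show a + (c + 3) = (a + c) + 3 by omega, h1, h2]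
      nlinarith [pvG_nonneg a, pvG_nonneg c]
  · obtain ⟨c, rfl⟩ : ∃ c, a = c + 3 := ⟨a - 3, by omega⟩
    have h1 : pvG (c + 3) = 3 * pvG c := pvG_add3 c (by omega)
    have h2 : pvG (c + b + 3) = 3 * pvG (c + b) := pvG_add3 _ (by omega)
    have h3 := ih (c + b) (by omega) c b rfl (by omega) (by omega)
    rw [show (c + 3) + b = (c + b) + 3 by omega, h1, h2]
    nlinarith [pvG_nonneg b, pvG_nonneg c]

lemma pvG_supermul (a b : Nat) (ha : 1 ≤ a) (hb : 1 ≤ b) : pvG a * pvG b ≤ pvG (a + b) :=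
  pvG_supermul_aux (a + b) a b rfl ha hb

def pvInnerVal (i : Nat) : Int :=
  (List.range (i - 1)).foldl (fun a k => max a (((1 + k : Nat) : Int) * pvG (i - 1 - k))) 0

lemma foldl_max_le {α : Type} (xs : List α) (f : α → Int) (init B : Int)
    (h0 : init ≤ B) (h : ∀ x ∈ xs, f x ≤ B) :
    xs.foldl (fun a x => max a (f x)) init ≤ B := by
  induction xs generalizing init with
  | nil => exact h0
  | cons y ys ih =>
      exact ih _ (max_le h0 (h y (by simp))) (fun x hx => h x (by simp [hx]))

lemma pvInnerVal_eq (i : Nat) (h : 2 ≤ i) : pvInnerVal i = pvOptN i := by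
  by_cases h7 : i < 7
  · interval_cases i <;> decide
  · have h4 : 4 ≤ i := by omega
    have hge : (0 : Int) ≤ pvOptN i := le_trans (by positivity) (pvOptN_ge i h4)
    apply le_antisymm
    · apply foldl_max_le _ _ _ _ hge
      intro k hk
      have hk' : k < i - 1 := List.mem_range.mp hk
      have hterm : ((1 + k : Nat) : Int) * pvG (i - 1 - k) ≤ pvG (1 + k) * pvG (i - 1 - k) := by
        apply mul_le_mul_of_nonneg_right _ (pvG_nonneg _)
        exact le_max_right _ _
      refine le_trans hterm (le_trans (pvG_supermul (1 + k) (i - 1 - k) (by omega) (by omega)) ?_)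
      rw [show (1 + k) + (i - 1 - k) = i by omega, pvG_eq_opt i h4]
    · have hmem : (2 : Nat) ∈ List.range (i - 1) := List.mem_range.mpr (by omega)
      have := (PySem.List.le_foldl_max_int (List.range (i - 1))
        (fun k => ((1 + k : Nat) : Int) * pvG (i - 1 - k)) 0).2 2 hmem
      simp only at this
      have heq : ((1 + 2 : Nat) : Int) * pvG (i - 1 - 2) = pvOptN i := by
        rw [show i - 1 - 2 = i - 3 by omega, pvG_eq_opt (i - 3) (by omega),
          show i = (i - 3) + 3 by omega, pvOptN_add3 (i - 3) (by omega)]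
        norm_num
      rw [← heq]
      exact this

def pvTbl (n iN : Nat) : List Int :=
  (List.range (iN + 1)).map pvOptN ++ List.replicate (n - iN) 0

-- helper getD lemmas
lemma pv_getD_set_self (l : List Int) (i : Nat) (v : Int) (h : i < l.length) :
    (l.set i v).getD i 0 = v := by
  rw [List.getD_eq_getElem?_getD, List.getElem?_set_self (by simpa using h)]; rfl

lemma pv_getD_set_ne (l : List Int) (i m : Nat) (v : Int) (h : i ≠ m) :
    (l.set i v).getD m 0 = l.getD m 0 := by
  rw [List.getD_eq_getElem?_getD, List.getD_eq_getElem?_getD, List.getElem?_set_ne h]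

lemma pv_set_getD (l : List Int) (i : Nat) (h : i < l.length) : l.set i (l.getD i 0) = l := by
  have : l.getD i 0 = l[i] := by rw [List.getD_eq_getElem?_getD, List.getElem?_eq_getElem h]; rfl
  rw [this]; exact List.set_getElem_self h

lemma pvTbl_length (n iN : Nat) (h : iN ≤ n) : (pvTbl n iN).length = n + 1 := by
  simp [pvTbl]; omega

lemma pvTbl_getD_le (n iN m : Nat) (h : m ≤ iN) : (pvTbl n iN).getD m 0 = pvOptN m := by
  rw [pvTbl, List.getD_eq_getElem?_getD, List.getElem?_append_left (by simp; omega),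
    List.getElem?_map, List.getElem?_range (by omega)]
  rfl

lemma pvTbl_getD_gt (n iN m : Nat) (h1 : iN < m) (h2 : m ≤ n) : (pvTbl n iN).getD m 0 = 0 := by
  rw [pvTbl, List.getD_eq_getElem?_getD, List.getElem?_append_right (by simp; omega)]
  simp

lemma pvTbl_set (n i : Nat) (h1 : 1 ≤ i) (h2 : i ≤ n) :
    (pvTbl n (i - 1)).set i (pvOptN i) = pvTbl n i := by
  have hrep : n - (i - 1) = 1 + (n - i) := by omega
  have hi : (i - 1) + 1 = i := by omega
  rw [pvTbl, pvTbl, hrep, hi]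
  have hlen : (List.map pvOptN (List.range i)).length = i := by simp
  rw [show (1 + (n - i)) = (n - i) + 1 by omega]
  rw [show List.replicate ((n - i) + 1) (0 : Int) = (0 : Int) :: List.replicate (n - i) 0 from rfl]
  rw [List.set_append_right _ _ (by omega), hlen]
  simp [List.range_succ]

-- the inner fold, characterised: it sets slot i to the running max over the js
lemma pv_inner_fold (iN : Nat) :
    ∀ (js : List Int) (l : List Int), iN < l.length → (∀ j ∈ js, 1 ≤ j ∧ j.toNat < iN) →
    js.foldl (fun o j => PySem.List.pySetD o (iN : Int)
        (max (PySem.List.pyGetD o (iN : Int) 0) (j * max (PySem.List.pyGetD o ((iN : Int) - j) 0) ((iN : Int) - j)))) l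
    = l.set iN (js.foldl (fun a j => max a (j * max (PySem.List.pyGetD l ((iN : Int) - j) 0) ((iN : Int) - j))) (l.getD iN 0)) := by
  intro js
  induction js with
  | nil => intro l hl _; simp only [List.foldl_nil]; exact (pv_set_getD l iN hl).symm
  | cons j js ih =>
    intro l hl hj
    obtain ⟨hj1, hj2⟩ := hj j (by simp)
    have hcast : (iN : Int) - j = ((iN - j.toNat : Nat) : Int) := by omega
    have hstep : PySem.List.pySetD l (iN : Int)
        (max (PySem.List.pyGetD l (iN : Int) 0) (j * max (PySem.List.pyGetD l ((iN : Int) - j) 0) ((iN : Int) - j)))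
        = l.set iN (max (l.getD iN 0) (j * max (PySem.List.pyGetD l ((iN : Int) - j) 0) ((iN : Int) - j))) := by
      simp [PySem.List.pySetD_natCast, PySem.List.pyGetD_natCast]
    rw [List.foldl_cons, hstep, ih _ (by simpa using hl) (fun x hx => hj x (by simp [hx]))]
    rw [List.set_set]
    congr 1
    rw [pv_getD_set_self l iN _ hl]
    apply PySem.List.foldl_congr_mem
    intro acc x hx
    obtain ⟨hx1, hx2⟩ := hj x (by simp [hx])
    have hc2 : (iN : Int) - x = ((iN - x.toNat : Nat) : Int) := by omega
    rw [hc2, PySem.List.pyGetD_natCast, PySem.List.pyGetD_natCast,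
      pv_getD_set_ne l iN (iN - x.toNat) _ (by omega)]

lemma pvStep (n i : Nat) (h2 : 2 ≤ i) (hin : i ≤ n) :
    (PySem.List.pyRange 1 (i : Int) 1).foldl
      (fun o j => PySem.List.pySetD o (i : Int)
        (max (PySem.List.pyGetD o (i : Int) 0) (j * max (PySem.List.pyGetD o ((i : Int) - j) 0) ((i : Int) - j))))
      (pvTbl n (i - 1)) = pvTbl n i := by
  have hl : i < (pvTbl n (i - 1)).length := by rw [pvTbl_length n _ (by omega)]; omega
  rw [pv_inner_fold i _ _ hl (fun j hj => by
    have := PySem.List.mem_pyRange_one.mp hj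
    exact ⟨this.1, by omega⟩)]
  have hacc : (pvTbl n (i - 1)).getD i 0 = 0 := pvTbl_getD_gt n (i - 1) i (by omega) hin
  have hfold : (PySem.List.pyRange 1 (i : Int) 1).foldl
      (fun a j => max a (j * max (PySem.List.pyGetD (pvTbl n (i - 1)) ((i : Int) - j) 0) ((i : Int) - j)))
      ((pvTbl n (i - 1)).getD i 0) = pvInnerVal i := by
    rw [hacc, PySem.List.pyRange_one, List.foldl_map, pvInnerVal]
    rw [show ((i : Int) - 1).toNat = i - 1 by omega]
    apply PySem.List.foldl_congr_mem
    intro acc k hk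
    have hk' : k < i - 1 := List.mem_range.mp hk
    have hc : (i : Int) - (1 + (k : Int)) = ((i - 1 - k : Nat) : Int) := by omega
    rw [hc, PySem.List.pyGetD_natCast, pvTbl_getD_le n (i - 1) _ (by omega)]
    have : (1 : Int) + (k : Int) = ((1 + k : Nat) : Int) := by omega
    rw [this, pvG]
  rw [hfold, pvInnerVal_eq i h2, pvTbl_set n i (by omega) hin]

lemma pvOuter (n : Nat) (hn : 1 ≤ n) : ∀ iN : Nat, 1 ≤ iN → iN ≤ n →
    (PySem.List.pyRange 2 ((iN : Int) + 1) 1).foldl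
      (fun opt i =>
        (PySem.List.pyRange 1 i 1).foldl
          (fun o j => PySem.List.pySetD o i
            (max (PySem.List.pyGetD o i 0) (j * max (PySem.List.pyGetD o (i - j) 0) (i - j))))
          opt)
      (pvTbl n 1) = pvTbl n iN := by
  intro iN
  induction iN with
  | zero => omega
  | succ m ihm =>
    intro _ hmn
    by_cases hm : m = 0
    · subst hm
      rw [show ((1 : Nat) : Int) + 1 = 2 by norm_num, PySem.List.pyRange_one_eq_nil (by norm_num)]
      rfl
    · rw [show ((m + 1 : Nat) : Int) + 1 = ((m : Int) + 1) + 1 by push_cast; ring,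
        PySem.List.pyRange_one_succ_right (by omega), List.foldl_append,
        ihm (by omega) (by omega), List.foldl_cons, List.foldl_nil]
      have := pvStep n (m + 1) (by omega) hmn
      rw [show ((m : Int) + 1) = ((m + 1 : Nat) : Int) by push_cast; ring]
      rw [show m = (m + 1) - 1 from rfl] at this ⊢
      exact this

theorem pv_main (n : Int) (hn : 1 ≤ n) : buscarOptimos n = buscarOptimos_alt n := by
  obtain ⟨nN, rfl⟩ : ∃ m : Nat, n = (m : Int) := ⟨n.toNat, by omega⟩
  have hnN : 1 ≤ nN := by exact_mod_cast hn
  unfold buscarOptimos buscarOptimos_alt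
  have hinit : ((List.replicate (((nN : Int) + 1).toNat) (0 : Int)).set 0 0).set 1 1 = pvTbl nN 1 := by
    obtain ⟨m, rfl⟩ : ∃ m, nN = m + 1 := ⟨nN - 1, by omega⟩
    rw [show (((m + 1 : Nat) : Int) + 1).toNat = m + 2 by omega]
    simp [List.replicate_succ, pvTbl, List.range_succ]
    constructor <;> rfl
  simp only [PySem.List.len_eq, List.length_set, List.length_replicate]
  rw [show ((((nN : Int) + 1).toNat : Int)) = (nN : Int) + 1 by omega]
  rw [hinit, pvOuter nN hnN nN hnN (le_refl _)]
  rw [pvTbl, Nat.sub_self, List.replicate_zero, List.append_nil]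
  rw [PySem.List.pyRange_one, show ((nN : Int) + 1 - 0).toNat = nN + 1 by omega, List.map_map]
  apply List.map_congr_left
  intro k hk
  simp only [Function.comp]
  rw [show (0 : Int) + (k : Int) = ((k : Nat) : Int) by omega, pvOpt_natCast]

-- ===== VERDICT (by name: the statement is the Claim_ definition above) =====
theorem buscarOptimos_spec : Claim_equal_buscarOptimos := by
  intro n _ hp
  unfold Spec_buscarOptimos
  exact pv_main n hp
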